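-- pv_equiv track=rewrite | github.com/xile42/leetcode | python3/3703. 移除K-平衡子字符串.py | removeSubstring
-- ===== SOURCE A (Python) =====
-- def removeSubstring(s: str, k: int) -> str:
--
--     st = list()
--     pattern = "(" * k + ")" * k
--     idx = 0
--     history_idx = list()
--     for c in s:
--         if c == pattern[idx]:
--             idx += 1
--             if idx == len(pattern):
--                 st = st[:-2 * k + 1]
--                 history_idx = history_idx[:-2 * k + 1]
--                 idx = history_idx[-1] if history_idx else 0
--             else:
--                 st.append(c)
--                 history_idx.append(idx)
--         else:
--             if c == "(":
--                 if idx == k: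
--                     history_idx.append(idx)
--                 else:
--                     idx = 1
--                     history_idx.append(idx)
--             else:
--                 idx = 0
--                 history_idx.append(idx)
--             st.append(c)
--
--     return "".join(st)
-- ===== SOURCE B (Python) =====
-- def removeSubstring(s: str, k: int) -> str:
--     # run-length stack of (char, count) groups
--     st = []
--     for c in s:
--         if st and st[-1][0] == c:
--             st[-1] = (c, st[-1][1] + 1)
--         else:
--             st.append((c, 1))
--         if c == ')' and len(st) >= 2 and st[-1][1] == k and st[-2][0] == '(' and st[-2][1] >= k:
--             st.pop()
--             ch, n = st.pop()
--             if n > k: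
--                 st.append((ch, n - k))
--     return "".join(ch * n for ch, n in st)
-- ===== Notes on version B (the rewrite author's own statement) =====
-- stated objective: simpler
-- what changed: Replaces A's pattern-pointer matcher with its per-character history_idx restore list by a run-length stack of (char, count) groups: a ')' group reaching count k on top of a '(' group with count >= k is popped and k is subtracted from the '(' group.
import Mathlib
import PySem

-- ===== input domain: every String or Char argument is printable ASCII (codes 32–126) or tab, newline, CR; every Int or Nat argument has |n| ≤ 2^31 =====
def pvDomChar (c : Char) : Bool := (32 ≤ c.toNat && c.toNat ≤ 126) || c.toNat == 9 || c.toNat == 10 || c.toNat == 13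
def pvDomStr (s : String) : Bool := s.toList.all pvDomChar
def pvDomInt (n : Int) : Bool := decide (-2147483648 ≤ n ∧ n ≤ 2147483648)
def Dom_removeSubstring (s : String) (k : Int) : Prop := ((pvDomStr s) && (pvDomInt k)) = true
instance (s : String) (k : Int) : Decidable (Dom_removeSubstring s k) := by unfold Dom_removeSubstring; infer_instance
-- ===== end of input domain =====

-- B replaces A's pattern-pointer/history-index matcher by a run-length stack of (char, count)
-- groups (objective: simpler). Equal return value on Pre_; A raises IndexError for k ≤ 0 on
-- nonempty s (pattern is empty), which Pre_ excludes; B returns s unchanged there.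

-- ===== PORT A =====
-- one loop step of A; state = (st, idx, history_idx); none = IndexError from pattern[idx]
def aStep (k : Int) (pattern : List Char) (st : List Char × Int × List Int) (c : Char) :
    Option (List Char × Int × List Int) :=
  match PySem.List.pyGet? pattern st.2.1 with
  | none => none
  | some p =>
    if c = p then
      let idx := st.2.1 + 1
      if idx = (pattern.length : Int) then
        let stl := PySem.List.slice st.1 none (some (-2 * k + 1))
        let hist := PySem.List.slice st.2.2 none (some (-2 * k + 1))
        let idx := match hist.getLast? with | some v => v | none => 0
        some (stl, idx, hist)
      else
        some (st.1 ++ [c], idx, st.2.2 ++ [idx])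
    else
      if c = '(' then
        if st.2.1 = k then
          some (st.1 ++ [c], st.2.1, st.2.2 ++ [st.2.1])
        else
          some (st.1 ++ [c], 1, st.2.2 ++ [1])
      else
        some (st.1 ++ [c], 0, st.2.2 ++ [0])

def removeSubstring (s : String) (k : Int) : String :=
  -- "(" * k + ")" * k  (kept as a list of chars; join at the end is String.ofList)
  let pattern := List.replicate k.toNat '(' ++ List.replicate k.toNat ')'
  match s.toList.foldl (fun acc c => acc.bind (fun t => aStep k pattern t c)) (some ([], 0, [])) with
  | some t => String.ofList t.1
  | none => ""   -- IndexError: excluded by Pre_removeSubstring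

-- ===== PORT B =====
-- one loop step of B; the stack keeps its TOP group at the head (Python's list end)
def bStep (k : Int) (st : List (Char × Int)) (c : Char) : List (Char × Int) :=
  let st :=
    match st with
    | (ch, n) :: rest => if ch = c then (c, n + 1) :: rest else (c, 1) :: (ch, n) :: rest
    | [] => [(c, 1)]
  if c = ')' then
    match st with
    | (_, n1) :: (ch2, n2) :: rest =>
      if n1 = k ∧ ch2 = '(' ∧ k ≤ n2 then
        if k < n2 then (ch2, n2 - k) :: rest else rest
      else st
    | _ => st
  else st

def removeSubstring_alt (s : String) (k : Int) : String :=
  let st := s.toList.foldl (bStep k) []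
  String.ofList (st.reverse.flatMap (fun g => List.replicate g.2.toNat g.1))

-- ===== PRECONDITION & SPEC =====
-- Pre_ excludes exactly the inputs where A raises IndexError: k ≤ 0 with a nonempty s
-- (the pattern "("*k+")"*k is empty, so pattern[0] fails on the first character).
def Pre_removeSubstring (s : String) (k : Int) : Prop := s = "" ∨ 1 ≤ k
instance (s : String) (k : Int) : Decidable (Pre_removeSubstring s k) := by
  unfold Pre_removeSubstring; infer_instance
def pvWitness_removeSubstring : String × Int := ("(a(())b)", 2)

def Spec_removeSubstring (s : String) (k : Int) (out : String) : Prop := out = removeSubstring_alt s k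
instance (s : String) (k : Int) (out : String) : Decidable (Spec_removeSubstring s k out) := by
  unfold Spec_removeSubstring; infer_instance

-- ===== CLAIM (what is proved, stated in full; the proofs are below) =====
def Claim_equal_removeSubstring : Prop := ∀ (s : String) (k : Int), Dom_removeSubstring s k → Pre_removeSubstring s k → Spec_removeSubstring s k (removeSubstring s k)

-- ===== LEMMAS AND PROOFS =====

-- well-formed run-length stack: positive counts, adjacent groups have distinct chars
def wfStack : List (Char × Int) → Prop
  | [] => True
  | (ch, n) :: rest =>
    1 ≤ n ∧ (match rest with | [] => True | (ch2, _) :: _ => ch2 ≠ ch) ∧ wfStack rest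

-- A's pattern index as a function of B's stack
def fIdx (k : Int) : List (Char × Int) → Int
  | [] => 0
  | (ch, m) :: rest =>
    if ch = '(' then min m k
    else if ch = ')' then
      match rest with
      | (ch2, c) :: _ => if ch2 = '(' ∧ m < k ∧ k ≤ c then k + m else 0
      | [] => 0
    else 0

-- A's st as a function of B's stack
def expandG : List (Char × Int) → List Char
  | [] => []
  | (ch, m) :: rest => expandG rest ++ List.replicate m.toNat ch

-- A's history_idx as a function of B's stack
def histG (k : Int) : List (Char × Int) → List Int
  | [] => []
  | (ch, m) :: rest =>
    histG k rest ++ (List.range m.toNat).map (fun j : Nat => fIdx k ((ch, (j : Int) + 1) :: rest))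

-- pattern[i] for 0 ≤ i < 2k is '(' below k and ')' above
lemma pat_get (k : Int) (hk : 1 ≤ k) (i : Int) (h0 : 0 ≤ i) (h2 : i < 2 * k) :
    PySem.List.pyGet? (List.replicate k.toNat '(' ++ List.replicate k.toNat ')') i =
      some (if i < k then '(' else ')') := by
  rw [PySem.List.pyGet?_of_nonneg _ h0]
  rcases lt_or_ge i k with h | h
  · rw [List.getElem?_append_left (by simp; omega)]
    simp [List.getElem?_replicate, h]; omega
  · rw [List.getElem?_append_right (by simp; omega)]
    simp [List.getElem?_replicate]
    omega

lemma expand_succ (ch : Char) (m : Int) (rest : List (Char × Int)) (hm : 0 ≤ m) :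
    expandG ((ch, m + 1) :: rest) = expandG ((ch, m) :: rest) ++ [ch] := by
  have : (m + 1).toNat = m.toNat + 1 := by omega
  simp [expandG, this, List.replicate_succ']

lemma hist_succ (k : Int) (ch : Char) (m : Int) (rest : List (Char × Int)) (hm : 0 ≤ m) :
    histG k ((ch, m + 1) :: rest) =
      histG k ((ch, m) :: rest) ++ [fIdx k ((ch, m + 1) :: rest)] := by
  have h1 : (m + 1).toNat = m.toNat + 1 := by omega
  have h2 : ((m.toNat : Int)) = m := by omega
  simp [histG, h1, List.range_succ, h2]

lemma expand_push (c : Char) (σ : List (Char × Int)) :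
    expandG ((c, 1) :: σ) = expandG σ ++ [c] := by
  simp [expandG]

lemma hist_push (k : Int) (c : Char) (σ : List (Char × Int)) :
    histG k ((c, 1) :: σ) = histG k σ ++ [fIdx k ((c, 1) :: σ)] := by
  simp [histG, List.range_succ]

lemma hist_getLast (k : Int) (ch : Char) (m : Int) (rest : List (Char × Int)) (hm : 1 ≤ m) :
    (histG k ((ch, m) :: rest)).getLast? = some (fIdx k ((ch, m) :: rest)) := by
  have h : m = (m - 1) + 1 := by omega
  rw [h, hist_succ k ch (m - 1) rest (by omega)]
  simp

-- history_idx[-1] if history_idx else 0, on a mirrored state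
lemma hist_last_default (k : Int) (σ : List (Char × Int)) (hwf : wfStack σ) :
    (match (histG k σ).getLast? with | some v => v | none => 0) = fIdx k σ := by
  match σ with
  | [] => rfl
  | (ch, m) :: rest =>
    rw [hist_getLast k ch m rest hwf.1]

-- dropping a suffix of length 2k-1 with a slice [:-2k+1]
lemma slice_cut {α : Type} (k : Int) (xs ys : List α)
    (hlen : (ys.length : Int) = 2 * k - 1) :
    PySem.List.slice (xs ++ ys) none (some (-2 * k + 1)) = xs := by
  have h1 : -2 * k + 1 = -((ys.length : Nat) : Int) := by omega
  rw [h1, PySem.List.slice_to_neg_natCast _ _ (by omega)]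
  simp

-- the removal step: A's slice [:-2k+1] of st/history equals B's pop-and-subtract, group-wise
lemma removal_core (k c2 : Int) (hk : 1 ≤ k) (hc2 : k ≤ c2) (rest : List (Char × Int))
    (hwf : wfStack rest)
    (hhd : ∀ ch2 n2 t, rest = (ch2, n2) :: t → ch2 ≠ '(') :
    PySem.List.slice
        (expandG rest ++ List.replicate c2.toNat '(' ++ List.replicate (k - 1).toNat ')')
        none (some (-2 * k + 1))
      = expandG (if k < c2 then ('(', c2 - k) :: rest else rest) ∧
    PySem.List.slice
        (histG k rest ++ (List.range c2.toNat).map (fun j : Nat => min ((j : Int) + 1) k)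
          ++ (List.range (k - 1).toNat).map (fun j : Nat => k + (j : Int) + 1))
        none (some (-2 * k + 1))
      = histG k (if k < c2 then ('(', c2 - k) :: rest else rest) ∧
    wfStack (if k < c2 then ('(', c2 - k) :: rest else rest) := by
  have hsplit : c2.toNat = (c2 - k).toNat + k.toNat := by omega
  refine ⟨?_, ?_, ?_⟩
  · rw [hsplit, List.replicate_add]
    have hgrp : expandG rest ++ (List.replicate (c2 - k).toNat '(' ++ List.replicate k.toNat '(') ++ List.replicate (k - 1).toNat ')'
        = (expandG rest ++ List.replicate (c2 - k).toNat '(') ++ (List.replicate k.toNat '(' ++ List.replicate (k - 1).toNat ')') := by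
      simp [List.append_assoc, - List.replicate_append_replicate]
    rw [hgrp, slice_cut k _ _ (by simp; omega)]
    split
    · simp [expandG]
    · have h0 : (c2 - k).toNat = 0 := by omega
      simp [h0]
  · rw [hsplit, List.range_add, List.map_append]
    have hgrp : histG k rest ++ ((List.range (c2 - k).toNat).map (fun j : Nat => min ((j : Int) + 1) k) ++ ((List.range k.toNat).map (fun x => (c2 - k).toNat + x)).map (fun j : Nat => min ((j : Int) + 1) k)) ++ (List.range (k - 1).toNat).map (fun j : Nat => k + (j : Int) + 1)
        = (histG k rest ++ (List.range (c2 - k).toNat).map (fun j : Nat => min ((j : Int) + 1) k)) ++ (((List.range k.toNat).map (fun x => (c2 - k).toNat + x)).map (fun j : Nat => min ((j : Int) + 1) k) ++ (List.range (k - 1).toNat).map (fun j : Nat => k + (j : Int) + 1)) := by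
      simp [List.append_assoc]
    rw [hgrp, slice_cut k _ _ (by simp; omega)]
    split
    · simp [histG, fIdx]
    · have h0 : (c2 - k).toNat = 0 := by omega
      simp [h0]
  · split
    · refine ⟨by omega, ?_, hwf⟩
      match rest, hhd with
      | [], _ => trivial
      | (ch2, n2) :: t, hhd => exact hhd ch2 n2 t rfl
    · exact hwf

lemma step_sim (k : Int) (hk : 1 ≤ k) (σ : List (Char × Int)) (hwf : wfStack σ) (c : Char) :
    aStep k (List.replicate k.toNat '(' ++ List.replicate k.toNat ')')
        (expandG σ, fIdx k σ, histG k σ) c =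
      some (expandG (bStep k σ c), fIdx k (bStep k σ c), histG k (bStep k σ c)) ∧
    wfStack (bStep k σ c) := by
  have hplen : (((List.replicate k.toNat '(' ++ List.replicate k.toNat ')') : List Char).length : Int) = 2 * k := by
    simp; omega
  match σ, hwf with
  | [], _ =>
    have hget := pat_get k hk 0 (by omega) (by omega)
    rw [if_pos (by omega)] at hget
    by_cases hc : c = '('
    · subst hc
      have hb : bStep k [] '(' = [('(', 1)] := by simp [bStep]
      rw [hb]
      refine ⟨?_, by simp [wfStack]⟩
      simp only [aStep, expandG, fIdx, histG]
      rw [hget]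
      simp
      rw [if_neg (by omega)]
      have h1 : min 1 k = 1 := by omega
      simp [h1]
    · have hb : bStep k [] c = [(c, 1)] := by
        simp [bStep]
      rw [hb]
      refine ⟨?_, by simp [wfStack]⟩
      simp only [aStep, expandG, fIdx, histG]
      rw [hget]
      simp [hc]
  | (ch, m) :: rest, ⟨hm, hadj, hwfr⟩ =>
    by_cases hch : ch = '('
    · subst hch
      by_cases hc : c = '('
      · subst hc
        by_cases hmk : m < k
        · -- '(' onto a short '(' group: pattern pointer advances
          have hget := pat_get k hk (min m k) (by omega) (by omega)
          rw [if_pos (by omega)] at hget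
          have hb : bStep k (('(', m) :: rest) '(' = ('(', m + 1) :: rest := by simp [bStep]
          rw [hb]
          refine ⟨?_, by omega, hadj, hwfr⟩
          simp only [aStep]
          rw [show fIdx k (('(', m) :: rest) = min m k from by simp [fIdx], hget]
          simp
          rw [if_neg (by omega)]
          rw [expand_succ _ _ _ (by omega), hist_succ _ _ _ _ (by omega),
            show fIdx k (('(', m + 1) :: rest) = min (m + 1) k from by simp [fIdx]]
          have h1 : min m k = m := by omega
          have h2 : min (m + 1) k = m + 1 := by omega
          simp [h1, h2]
        · -- '(' onto a saturated '(' group: idx stays at k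
          have hget := pat_get k hk (min m k) (by omega) (by omega)
          rw [if_neg (by omega)] at hget
          have hb : bStep k (('(', m) :: rest) '(' = ('(', m + 1) :: rest := by simp [bStep]
          rw [hb]
          refine ⟨?_, by omega, hadj, hwfr⟩
          simp only [aStep]
          rw [show fIdx k (('(', m) :: rest) = min m k from by simp [fIdx], hget]
          simp
          rw [if_pos (by omega)]
          rw [expand_succ _ _ _ (by omega), hist_succ _ _ _ _ (by omega),
            show fIdx k (('(', m + 1) :: rest) = min (m + 1) k from by simp [fIdx]]
          have h1 : min m k = k := by omega
          have h2 : min (m + 1) k = k := by omega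
          simp [h1, h2]
      · by_cases hc2 : c = ')'
        · subst hc2
          by_cases hmk : m < k
          · -- ')' after a short '(' group: mismatch, idx resets to 0
            have hget := pat_get k hk (min m k) (by omega) (by omega)
            rw [if_pos (by omega)] at hget
            have hb : bStep k (('(', m) :: rest) ')' = (')', 1) :: ('(', m) :: rest := by
              simp [bStep]
              rintro h1 h3; omega
            rw [hb]
            refine ⟨?_, by omega, by simp, by exact ⟨hm, hadj, hwfr⟩⟩
            simp only [aStep]
            rw [show fIdx k (('(', m) :: rest) = min m k from by simp [fIdx], hget]
            simp
            rw [expand_push, hist_push,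
              show fIdx k ((')', 1) :: ('(', m) :: rest) = 0 from by
                simp [fIdx]; rintro h1 h3; omega]
            exact ⟨rfl, rfl, rfl⟩
          · by_cases hk1 : k = 1
            · -- k = 1, ')' closes: the removal case
              subst hk1
              have hget := pat_get 1 hk (min m 1) (by omega) (by omega)
              rw [if_neg (by omega)] at hget
              have hb : bStep 1 (('(', m) :: rest) ')' =
                  (if 1 < m then ('(', m - 1) :: rest else rest) := by
                simp [bStep, hm]
              obtain ⟨hsl1, hsl2, hwf'⟩ := removal_core 1 m hk (by omega) rest hwfr
                (by rintro ch2 n2 t rfl; exact hadj)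
              rw [hb]
              refine ⟨?_, hwf'⟩
              simp only [aStep]
              rw [show fIdx 1 (('(', m) :: rest) = min m 1 from by simp [fIdx], hget]
              simp
              simp only [show ((1 : Int) - 1).toNat = 0 from rfl, List.range_zero,
                List.replicate_zero, List.map_nil, List.append_nil] at hsl1 hsl2
              rw [show expandG (('(', m) :: rest) = expandG rest ++ List.replicate m.toNat '(' from rfl]
              rw [if_pos (show min m 1 + 1 = 2 from by omega)]
              have hn : (-2 * 1 + 1 : Int) = -1 := by norm_num
              rw [hn] at hsl1 hsl2
              have hh : histG 1 (('(', m) :: rest) =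
                  histG 1 rest ++ List.map (fun j : Nat => min ((j : Int) + 1) 1) (List.range m.toNat) := by
                simp [histG, fIdx]
              rw [hh, hsl1, hsl2, hist_last_default 1 _ hwf']
            · -- k ≥ 2, ')' starts closing a saturated '(' group
              have hget := pat_get k hk (min m k) (by omega) (by omega)
              rw [if_neg (by omega)] at hget
              have hb : bStep k (('(', m) :: rest) ')' = (')', 1) :: ('(', m) :: rest := by
                simp [bStep]
                rintro h1; omega
              rw [hb]
              refine ⟨?_, by omega, by simp, by exact ⟨hm, hadj, hwfr⟩⟩
              simp only [aStep]
              rw [show fIdx k (('(', m) :: rest) = min m k from by simp [fIdx], hget]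
              simp
              rw [if_neg (by omega)]
              rw [expand_push, hist_push,
                show fIdx k ((')', 1) :: ('(', m) :: rest) = k + 1 from by simp [fIdx]; omega]
              have h1 : min m k = k := by omega
              rw [h1]
        · -- a non-paren char after a '(' group: idx resets to 0
          have hget := pat_get k hk (min m k) (by omega) (by omega)
          have hb : bStep k (('(', m) :: rest) c = (c, 1) :: ('(', m) :: rest := by
            simp [bStep, hc2, Ne.symm hc]
          rw [hb]
          refine ⟨?_, by omega, by exact Ne.symm hc, by exact ⟨hm, hadj, hwfr⟩⟩
          simp only [aStep]
          rw [show fIdx k (('(', m) :: rest) = min m k from by simp [fIdx], hget]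
          by_cases hmk : m < k
          · rw [if_pos (by omega)]
            simp [hc, expand_push, hist_push,
              show fIdx k ((c, 1) :: ('(', m) :: rest) = 0 from by simp [fIdx, hc, hc2]]
          · rw [if_neg (by omega)]
            simp [hc, hc2, expand_push, hist_push,
              show fIdx k ((c, 1) :: ('(', m) :: rest) = 0 from by simp [fIdx, hc, hc2]]
    · by_cases hch2 : ch = ')'
      · subst hch2
        match rest, hadj, hwfr with
        | [], _, _ =>
          have hget := pat_get k hk 0 (by omega) (by omega)
          rw [if_pos (by omega)] at hget
          have hi : fIdx k ((')', m) :: []) = 0 := by simp [fIdx]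
          by_cases hc : c = '('
          · subst hc
            have hb : bStep k ((')', m) :: []) '(' = ('(', 1) :: (')', m) :: [] := by
              simp [bStep]
            rw [hb]
            refine ⟨?_, by omega, by simp, by exact ⟨hm, trivial, trivial⟩⟩
            simp only [aStep]
            rw [hi, hget]
            simp
            rw [if_neg (by omega), expand_push, hist_push,
              show fIdx k (('(', 1) :: (')', m) :: []) = min 1 k from by simp [fIdx]]
            have h1 : min 1 k = 1 := by omega
            simp [h1]
          · by_cases hc2 : c = ')'
            · subst hc2
              have hb : bStep k ((')', m) :: []) ')' = (')', m + 1) :: [] := by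
                simp [bStep]
              rw [hb]
              refine ⟨?_, by omega, trivial, trivial⟩
              simp only [aStep]
              rw [hi, hget]
              simp
              rw [expand_succ _ _ _ (by omega), hist_succ _ _ _ _ (by omega),
                show fIdx k ((')', m + 1) :: []) = 0 from by simp [fIdx]]
              exact ⟨rfl, rfl, rfl⟩
            · have hb : bStep k ((')', m) :: []) c = (c, 1) :: (')', m) :: [] := by
                simp [bStep, hc2, show (')' : Char) ≠ c from fun h => hc2 h.symm]
              rw [hb]
              refine ⟨?_, by omega, by intro h; exact hc2 h.symm, by exact ⟨hm, trivial, trivial⟩⟩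
              simp only [aStep]
              rw [hi, hget]
              simp [hc, expand_push, hist_push,
                show fIdx k ((c, 1) :: (')', m) :: []) = 0 from by simp [fIdx, hc, hc2]]
        | (ch2, m2) :: rest2, hadj, hwfr =>
          by_cases hgood : ch2 = '(' ∧ m < k ∧ k ≤ m2
          · obtain ⟨hg1, hg2, hg3⟩ := hgood
            subst hg1
            have hi : fIdx k ((')', m) :: ('(', m2) :: rest2) = k + m := by
              simp [fIdx]; omega
            by_cases hc : c = '('
            · subst hc
              have hget := pat_get k hk (k + m) (by omega) (by omega)
              rw [if_neg (by omega)] at hget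
              have hb : bStep k ((')', m) :: ('(', m2) :: rest2) '(' =
                  ('(', 1) :: (')', m) :: ('(', m2) :: rest2 := by
                simp [bStep]
              rw [hb]
              refine ⟨?_, by omega, by simp, by exact ⟨hm, hadj, hwfr⟩⟩
              simp only [aStep]
              rw [hi, hget]
              simp
              rw [if_neg (by omega), expand_push, hist_push,
                show fIdx k (('(', 1) :: (')', m) :: ('(', m2) :: rest2) = min 1 k from by
                  simp [fIdx]]
              have h1 : min 1 k = 1 := by omega
              simp [h1]
            · by_cases hc2 : c = ')'
              · subst hc2
                by_cases hlast : m = k - 1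
                · -- the k-th ')': the removal case
                  subst hlast
                  have hget := pat_get k hk (k + (k - 1)) (by omega) (by omega)
                  rw [if_neg (by omega)] at hget
                  have hb : bStep k ((')', k - 1) :: ('(', m2) :: rest2) ')' =
                      (if k < m2 then ('(', m2 - k) :: rest2 else rest2) := by
                    simp [bStep]
                    intro h; exact absurd h (by omega)
                  obtain ⟨hsl1, hsl2, hwf'⟩ := removal_core k m2 hk (by omega) rest2 hwfr.2.2
                    (by rintro ch3 n3 t rfl; exact hwfr.2.1)
                  rw [hb]
                  refine ⟨?_, hwf'⟩
                  simp only [aStep]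
                  rw [hi, hget]
                  simp
                  rw [if_pos (by omega)]
                  have hhe : expandG ((')', k - 1) :: ('(', m2) :: rest2) =
                      expandG rest2 ++ List.replicate m2.toNat '(' ++ List.replicate (k - 1).toNat ')' := by
                    simp [expandG]
                  have hB : (List.range (k - 1).toNat).map
                        (fun j : Nat => fIdx k ((')', (j : Int) + 1) :: ('(', m2) :: rest2)) =
                      (List.range (k - 1).toNat).map (fun j : Nat => k + (j : Int) + 1) := by
                    apply List.map_congr_left
                    intro j hj
                    rw [List.mem_range] at hj
                    have hjk : ((j : Int)) + 1 < k := by omega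
                    simp [fIdx, hjk, hg3]
                    ring
                  have hhh : histG k ((')', k - 1) :: ('(', m2) :: rest2) =
                      histG k rest2 ++ (List.range m2.toNat).map (fun j : Nat => min ((j : Int) + 1) k)
                        ++ (List.range (k - 1).toNat).map (fun j : Nat => k + (j : Int) + 1) := by
                    simp only [histG, hB]
                    simp [fIdx]
                  have hneg : ((-2 : Int) * k + 1) = -(2 * k) + 1 := by ring
                  rw [hneg] at hsl1 hsl2
                  rw [hhe, hhh, hsl1, hsl2, hist_last_default k _ hwf']
                · -- an inner ')': pattern pointer advances
                  have hget := pat_get k hk (k + m) (by omega) (by omega)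
                  rw [if_neg (by omega)] at hget
                  have hb : bStep k ((')', m) :: ('(', m2) :: rest2) ')' =
                      (')', m + 1) :: ('(', m2) :: rest2 := by
                    simp [bStep]
                    rintro h1; omega
                  rw [hb]
                  refine ⟨?_, by omega, hadj, hwfr⟩
                  simp only [aStep]
                  rw [hi, hget]
                  simp
                  rw [if_neg (by omega), expand_succ _ _ _ (by omega), hist_succ _ _ _ _ (by omega),
                    show fIdx k ((')', m + 1) :: ('(', m2) :: rest2) = k + (m + 1) from by
                      have h1 : m + 1 < k := by omega
                      simp [fIdx, h1, hg3]]
                  simp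
                  omega
              · have hget := pat_get k hk (k + m) (by omega) (by omega)
                rw [if_neg (by omega)] at hget
                have hb : bStep k ((')', m) :: ('(', m2) :: rest2) c =
                    (c, 1) :: (')', m) :: ('(', m2) :: rest2 := by
                  simp [bStep, hc2, show (')' : Char) ≠ c from fun h => hc2 h.symm]
                rw [hb]
                refine ⟨?_, by omega, by intro h; exact hc2 h.symm, by exact ⟨hm, hadj, hwfr⟩⟩
                simp only [aStep]
                rw [hi, hget]
                simp [hc, hc2, expand_push, hist_push,
                  show fIdx k ((c, 1) :: (')', m) :: ('(', m2) :: rest2) = 0 from by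
                    simp [fIdx, hc, hc2]]
          · have hi : fIdx k ((')', m) :: (ch2, m2) :: rest2) = 0 := by
              simp only [fIdx, if_true]
              rw [if_neg hgood]
              simp
            have hget := pat_get k hk 0 (by omega) (by omega)
            rw [if_pos (by omega)] at hget
            by_cases hc : c = '('
            · subst hc
              have hb : bStep k ((')', m) :: (ch2, m2) :: rest2) '(' =
                  ('(', 1) :: (')', m) :: (ch2, m2) :: rest2 := by
                simp [bStep]
              rw [hb]
              refine ⟨?_, by omega, by simp, by exact ⟨hm, hadj, hwfr⟩⟩
              simp only [aStep]
              rw [hi, hget]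
              simp
              rw [if_neg (by omega), expand_push, hist_push,
                show fIdx k (('(', 1) :: (')', m) :: (ch2, m2) :: rest2) = min 1 k from by
                  simp [fIdx]]
              have h1 : min 1 k = 1 := by omega
              simp [h1]
            · by_cases hc2 : c = ')'
              · subst hc2
                have hb : bStep k ((')', m) :: (ch2, m2) :: rest2) ')' =
                    (')', m + 1) :: (ch2, m2) :: rest2 := by
                  simp [bStep]
                  intro h1 h2 h3; exact absurd ⟨h2, by omega, h3⟩ hgood
                rw [hb]
                refine ⟨?_, by omega, hadj, hwfr⟩
                simp only [aStep]
                rw [hi, hget]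
                simp
                have hfx : fIdx k ((')', m + 1) :: (ch2, m2) :: rest2) = 0 := by
                  simp only [fIdx]
                  rw [if_neg (show ¬')' = '(' from by decide)]
                  by_cases hgg : ch2 = '(' ∧ m + 1 < k ∧ k ≤ m2
                  · exact absurd ⟨hgg.1, by omega, hgg.2.2⟩ hgood
                  · rw [if_neg hgg]
                    simp
                rw [expand_succ _ _ _ (by omega), hist_succ _ _ _ _ (by omega), hfx]
                exact ⟨rfl, rfl, rfl⟩
              · have hb : bStep k ((')', m) :: (ch2, m2) :: rest2) c =
                    (c, 1) :: (')', m) :: (ch2, m2) :: rest2 := by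
                  simp [bStep, hc2, show (')' : Char) ≠ c from fun h => hc2 h.symm]
                rw [hb]
                refine ⟨?_, by omega, by intro h; exact hc2 h.symm, by exact ⟨hm, hadj, hwfr⟩⟩
                simp only [aStep]
                rw [hi, hget]
                simp [hc, expand_push, hist_push,
                  show fIdx k ((c, 1) :: (')', m) :: (ch2, m2) :: rest2) = 0 from by
                    simp [fIdx, hc, hc2]]
      · -- the top group holds a non-paren char
        have hi : fIdx k ((ch, m) :: rest) = 0 := by
          simp only [fIdx]
          rw [if_neg hch, if_neg hch2]
        have hget := pat_get k hk 0 (by omega) (by omega)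
        rw [if_pos (by omega)] at hget
        by_cases hc : c = '('
        · subst hc
          have hb : bStep k ((ch, m) :: rest) '(' = ('(', 1) :: (ch, m) :: rest := by
            simp [bStep, hch]
          rw [hb]
          refine ⟨?_, by omega, by exact hch, by exact ⟨hm, hadj, hwfr⟩⟩
          simp only [aStep]
          rw [hi, hget]
          simp
          rw [if_neg (by omega), expand_push, hist_push,
            show fIdx k (('(', 1) :: (ch, m) :: rest) = min 1 k from by simp [fIdx]]
          have h1 : min 1 k = 1 := by omega
          simp [h1]
        · by_cases hcch : c = ch
          · subst hcch
            have hb : bStep k ((c, m) :: rest) c = (c, m + 1) :: rest := by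
              simp [bStep, hch2]
            rw [hb]
            refine ⟨?_, by omega, hadj, hwfr⟩
            simp only [aStep]
            rw [hi, hget]
            simp [hc]
            rw [expand_succ _ _ _ (by omega), hist_succ _ _ _ _ (by omega),
              show fIdx k ((c, m + 1) :: rest) = 0 from by
                simp only [fIdx]; rw [if_neg hc, if_neg hch2]]
            exact ⟨rfl, rfl, rfl⟩
          · by_cases hc2 : c = ')'
            · subst hc2
              have hb : bStep k ((ch, m) :: rest) ')' = (')', 1) :: (ch, m) :: rest := by
                simp [bStep, Ne.symm hcch]
                rintro h1 h2; exact absurd h2 hch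
              rw [hb]
              refine ⟨?_, by omega, by exact Ne.symm hcch, by exact ⟨hm, hadj, hwfr⟩⟩
              simp only [aStep]
              rw [hi, hget]
              simp
              have hfx : fIdx k ((')', 1) :: (ch, m) :: rest) = 0 := by
                simp only [fIdx]
                rw [if_neg (show ¬')' = '(' from by decide)]
                rw [if_neg (show ¬(ch = '(' ∧ 1 < k ∧ k ≤ m) from fun hh => hch hh.1)]
                simp
              rw [expand_push, hist_push, hfx]
              exact ⟨rfl, rfl, rfl⟩
            · have hb : bStep k ((ch, m) :: rest) c = (c, 1) :: (ch, m) :: rest := by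
                simp [bStep, hc2, Ne.symm hcch]
              rw [hb]
              refine ⟨?_, by omega, by exact Ne.symm hcch, by exact ⟨hm, hadj, hwfr⟩⟩
              simp only [aStep]
              rw [hi, hget]
              simp [hc, expand_push, hist_push,
                show fIdx k ((c, 1) :: (ch, m) :: rest) = 0 from by simp [fIdx, hc, hc2]]

lemma fold_sim (k : Int) (hk : 1 ≤ k) (l : List Char) :
    ∀ σ : List (Char × Int), wfStack σ →
      l.foldl (fun acc c => acc.bind (fun t =>
          aStep k (List.replicate k.toNat '(' ++ List.replicate k.toNat ')') t c))
        (some (expandG σ, fIdx k σ, histG k σ)) =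
        some (expandG (l.foldl (bStep k) σ), fIdx k (l.foldl (bStep k) σ),
              histG k (l.foldl (bStep k) σ)) ∧
      wfStack (l.foldl (bStep k) σ) := by
  induction l with
  | nil => intro σ h; exact ⟨rfl, h⟩
  | cons c l ih =>
    intro σ h
    obtain ⟨hstep, hwf⟩ := step_sim k hk σ h c
    simpa [List.foldl_cons, hstep] using ih (bStep k σ c) hwf

lemma expandG_eq_flatMap (σ : List (Char × Int)) :
    expandG σ = σ.reverse.flatMap (fun g => List.replicate g.2.toNat g.1) := by
  induction σ with
  | nil => rfl
  | cons g rest ih => cases g; simp [expandG, ih]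

-- ===== VERDICT (by name: the statement is the Claim_ definition above) =====
theorem removeSubstring_spec : Claim_equal_removeSubstring := by
  intro s k _ hpre
  unfold Spec_removeSubstring removeSubstring removeSubstring_alt
  rcases hpre with hs | hk
  · subst hs; rfl
  · have h := fold_sim k hk s.toList [] trivial
    simp only [expandG, fIdx, histG] at h
    simp only []
    rw [h.1, expandG_eq_flatMap]
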